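-- pv_equiv track=rewrite | github.com/Dounia18/FovVideoVDP | pyfvvdp/fvvdp_lpyr_dec.py | max_levels
-- ===== SOURCE A (Python) =====
-- import math
--
-- def max_levels(image_size, filter_size):
--
--     filter_size = filter_size[0]
--     levels = 0
--     while True:
--         if image_size < filter_size:
--             break
--         image_size = math.floor(image_size / 2)
--         levels += 1
--
--     return levels
-- ===== SOURCE B (Python) =====
-- def max_levels(image_size, filter_size):
--     f = filter_size[0]
--     return max(image_size // f, 0).bit_length()
-- ===== Notes on version B (the rewrite author's own statement) =====
-- stated objective: alternative
-- what changed: Replaces the repeated-halving loop with a closed form: the answer is the bit length of image_size // filter_size[0] (clamped at 0), so no loop runs (O(1) big-int operations instead of O(log image_size) iterations; not confirmed faster in a timing run).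
-- outside the precondition, e.g. on max_levels(-10, (-2,)): A returns 0, B returns 3; on max_levels(5, (0,)): A does not finish within the time limit, B raises ZeroDivisionError
import Mathlib
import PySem

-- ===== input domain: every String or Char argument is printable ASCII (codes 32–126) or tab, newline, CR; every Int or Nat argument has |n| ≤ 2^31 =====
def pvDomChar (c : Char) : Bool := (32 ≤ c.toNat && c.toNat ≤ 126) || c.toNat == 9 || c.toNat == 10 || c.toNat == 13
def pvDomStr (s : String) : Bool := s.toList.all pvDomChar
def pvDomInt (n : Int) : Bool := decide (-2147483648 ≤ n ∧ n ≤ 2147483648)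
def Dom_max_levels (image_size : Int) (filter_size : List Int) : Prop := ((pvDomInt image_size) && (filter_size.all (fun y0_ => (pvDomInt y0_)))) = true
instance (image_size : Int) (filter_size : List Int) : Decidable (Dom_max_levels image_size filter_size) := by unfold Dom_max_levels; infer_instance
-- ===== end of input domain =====

-- B replaces A's halving loop by a closed form: the bit length of image_size // filter_size[0]; no loop runs.

-- ===== PORT A =====
-- A's 'while True' loop, fueled for totality (fuel image_size.toNat + 1 always suffices
-- under Pre_, where filter_size[0] ≥ 1).  math.floor(image_size / 2) equals floor division
-- by 2 exactly for the |n| ≤ 2^31 integers of the domain (float division is exact there).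
def max_levels_loop : Nat → Int → Int → Int → Int
  | 0, _, _, levels => levels
  | n + 1, image, f, levels =>
    if image < f then levels
    else max_levels_loop n (PySem.Int.floordiv image 2) f (levels + 1)

def max_levels (image_size : Int) (filter_size : List Int) : Int :=
  match PySem.List.pyGet? filter_size 0 with
  | none => 0   -- IndexError in Python; excluded by Pre_
  | some f => max_levels_loop (image_size.toNat + 1) image_size f 0

-- ===== PORT B =====
def max_levels_alt (image_size : Int) (filter_size : List Int) : Int :=
  match PySem.List.pyGet? filter_size 0 with
  | none => 0   -- IndexError in Python; excluded by Pre_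
  | some f => (PySem.Int.bitLength (max (PySem.Int.floordiv image_size f) 0) : Int)

-- ===== PRECONDITION & SPEC =====
-- Pre_ restricts to the natural domain: a nonempty filter_size with a positive filter
-- width.  On [] A raises IndexError; on filter_size[0] ≤ 0 A either loops forever or
-- (when image_size < filter_size[0] ≤ 0) returns 0 by an accidental entry check outside
-- the function's purpose, while B computes from the zero/negative division.
def Pre_max_levels (image_size : Int) (filter_size : List Int) : Prop :=
  filter_size ≠ [] ∧ 1 ≤ filter_size.headI
instance (image_size : Int) (filter_size : List Int) : Decidable (Pre_max_levels image_size filter_size) := by unfold Pre_max_levels; infer_instance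

def pvWitness_max_levels : Int × List Int := (256, [5])

def Spec_max_levels (image_size : Int) (filter_size : List Int) (out : Int) : Prop := out = max_levels_alt image_size filter_size
instance (image_size : Int) (filter_size : List Int) (out : Int) : Decidable (Spec_max_levels image_size filter_size out) := by unfold Spec_max_levels; infer_instance

-- ===== CLAIM (what is proved, stated in full; the proofs are below) =====
def Claim_equal_max_levels : Prop := ∀ (image_size : Int) (filter_size : List Int), Dom_max_levels image_size filter_size → Pre_max_levels image_size filter_size → Spec_max_levels image_size filter_size (max_levels image_size filter_size)

-- ===== LEMMAS AND PROOFS =====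

-- The loop with enough fuel computes levels + bitLength (max (image // f) 0), for f ≥ 1.
lemma max_levels_loop_eq (f : Int) (hf : 1 ≤ f) :
    ∀ (n : Nat) (image levels : Int), image.toNat < n →
      max_levels_loop n image f levels =
        levels + (PySem.Int.bitLength (max (PySem.Int.floordiv image f) 0) : Int) := by
  intro n
  induction n with
  | zero => intro image levels h; omega
  | succ n ih =>
    intro image levels h
    by_cases hlt : image < f
    · -- break: image // f ≤ 0, so the clamped quotient is 0 and bitLength is 0
      have hq : PySem.Int.floordiv image f < 1 := by
        rw [PySem.Int.floordiv_lt_iff_lt_mul (by omega)]; omega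
      have : max (PySem.Int.floordiv image f) 0 = 0 := by omega
      simp [max_levels_loop, hlt, this, PySem.Int.bitLength_zero]
    · -- continue: quotient ≥ 1, peel one bit
      rw [not_lt] at hlt
      have hq1 : 1 ≤ PySem.Int.floordiv image f := by
        rw [PySem.Int.le_floordiv_iff_mul_le (by omega)]; omega
      have himg1 : 1 ≤ image := le_trans hf hlt
      have hed : ∀ (a b : Int), 0 < b → PySem.Int.floordiv a b = a / b := fun a b hb =>
        PySem.Int.floordiv_eq_ediv_of_pos hb
      have hhalf : PySem.Int.floordiv (PySem.Int.floordiv image 2) f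
          = PySem.Int.floordiv (PySem.Int.floordiv image f) 2 := by
        rw [hed _ _ (by omega : (0:Int) < 2), hed _ _ (by omega : 0 < f),
            hed _ _ (by omega : 0 < f), hed _ _ (by omega : (0:Int) < 2),
            Int.ediv_ediv_of_nonneg (by omega), Int.ediv_ediv_of_nonneg (by omega),
            mul_comm]
      have hfuel : (PySem.Int.floordiv image 2).toNat < n := by
        have h2 : PySem.Int.floordiv image 2 = image / 2 := hed _ _ (by omega)
        have := Int.mul_ediv_add_emod image 2
        have := Int.emod_nonneg image (by omega : (2:Int) ≠ 0)
        have := Int.emod_lt_of_pos image (by omega : (0:Int) < 2)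
        omega
      have hbl : PySem.Int.bitLength (max (PySem.Int.floordiv image f) 0)
          = PySem.Int.bitLength (max (PySem.Int.floordiv (PySem.Int.floordiv image 2) f) 0) + 1 := by
        rw [hhalf]
        have hmax1 : max (PySem.Int.floordiv image f) 0 = PySem.Int.floordiv image f := by omega
        have hq2 : 0 ≤ PySem.Int.floordiv (PySem.Int.floordiv image f) 2 := by
          rw [hed _ _ (by omega : (0:Int) < 2)]
          exact Int.ediv_nonneg (by omega) (by omega)
        have hmax2 : max (PySem.Int.floordiv (PySem.Int.floordiv image f) 2) 0
            = PySem.Int.floordiv (PySem.Int.floordiv image f) 2 := by omega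
        rw [hmax1, hmax2]
        exact PySem.Int.bitLength_of_pos (by omega)
      simp only [max_levels_loop, if_neg (by omega : ¬ image < f)]
      rw [ih _ _ hfuel, hbl]
      push_cast
      ring

-- ===== VERDICT (by name: the statement is the Claim_ definition above) =====
theorem max_levels_spec : Claim_equal_max_levels := by
  intro image_size filter_size _ hpre
  match filter_size with
  | [] => exact absurd hpre.1 (by simp)
  | f :: rest =>
    have hf : 1 ≤ f := hpre.2
    unfold Spec_max_levels max_levels max_levels_alt
    simp only [PySem.List.pyGet?_zero_cons]
    rw [max_levels_loop_eq f hf _ _ _ (by omega)]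
    ring
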